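-- pv_equiv track=rewrite | github.com/DickiyAngel/semgrep_tests | 5/vulnerable_app.py | complicated_function
-- ===== SOURCE A (Python) =====
-- def complicated_function(x, y, z):
--     result = 0
--     for i in range(10):
--         if x > y and y < z or x == y and y != z or x < y and y > z:
--             result += i * x * y * z
--             if result > 100:
--                 for j in range(5):
--                     result -= j
--                     while result < 50:
--                         result += 1
--     return result
-- ===== SOURCE B (Python) =====
-- def complicated_function(x, y, z):
--     if not ((x > y and y < z) or (x == y and y != z) or (x < y and y > z)):
--         return 0
--     p = x * y * z
--     result = 0
--     for i in range(10):
--         result += i * p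
--         if result > 100:
--             result -= 10
--     return result
-- ===== Notes on version B (the rewrite author's own statement) =====
-- stated objective: simpler
-- what changed: Hoists the loop-invariant guard into a single early return and the product x*y*z into a constant, and collapses the whole inner for-j/while block into a single 'result -= 10' (provably the clamp loop never fires since result > 100 on entry).
import Mathlib
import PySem

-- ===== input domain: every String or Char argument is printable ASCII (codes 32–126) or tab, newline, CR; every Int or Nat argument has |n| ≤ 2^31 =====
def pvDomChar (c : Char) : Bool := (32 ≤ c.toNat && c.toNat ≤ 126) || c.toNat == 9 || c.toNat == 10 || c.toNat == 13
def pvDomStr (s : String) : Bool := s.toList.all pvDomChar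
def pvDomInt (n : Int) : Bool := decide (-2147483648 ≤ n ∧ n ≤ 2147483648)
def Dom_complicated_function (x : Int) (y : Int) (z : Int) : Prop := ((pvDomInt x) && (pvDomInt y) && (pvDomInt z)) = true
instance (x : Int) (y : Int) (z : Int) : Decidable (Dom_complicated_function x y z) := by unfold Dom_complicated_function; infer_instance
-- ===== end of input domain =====

-- B hoists the loop-invariant guard into an early return, hoists the product x*y*z,
-- and collapses the inner for/while block into a single `result - 10`.

-- ===== PORT A =====
-- `while result < 50: result += 1`, literally
def pvWhileA (r : Int) : Int :=
  if r < 50 then pvWhileA (r + 1) else r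
termination_by (50 - r).toNat
decreasing_by omega

def complicated_function (x : Int) (y : Int) (z : Int) : Int :=
  (PySem.List.pyRange 0 10 1).foldl (fun result i =>
    if (x > y ∧ y < z) ∨ (x = y ∧ y ≠ z) ∨ (x < y ∧ y > z) then
      let result := result + i * x * y * z
      if result > 100 then
        (PySem.List.pyRange 0 5 1).foldl (fun result j => pvWhileA (result - j)) result
      else result
    else result) 0

-- ===== PORT B =====
def complicated_function_alt (x : Int) (y : Int) (z : Int) : Int :=
  if ¬ ((x > y ∧ y < z) ∨ (x = y ∧ y ≠ z) ∨ (x < y ∧ y > z)) then 0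
  else
    let p := x * y * z
    (PySem.List.pyRange 0 10 1).foldl (fun result i =>
      let result := result + i * p
      if result > 100 then result - 10 else result) 0

-- ===== PRECONDITION & SPEC =====
def Spec_complicated_function (x : Int) (y : Int) (z : Int) (out : Int) : Prop := out = complicated_function_alt x y z
instance (x : Int) (y : Int) (z : Int) (out : Int) : Decidable (Spec_complicated_function x y z out) := by unfold Spec_complicated_function; infer_instance

-- ===== CLAIM (what is proved, stated in full; the proofs are below) =====
def Claim_equal_complicated_function : Prop := ∀ (x : Int) (y : Int) (z : Int), Dom_complicated_function x y z → Spec_complicated_function x y z (complicated_function x y z)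

-- ===== LEMMAS AND PROOFS =====
theorem pvWhileA_eq_self (r : Int) (h : 50 ≤ r) : pvWhileA r = r := by
  unfold pvWhileA
  simp [show ¬ r < 50 by omega]

theorem pvRange5 : PySem.List.pyRange 0 5 1 = [0, 1, 2, 3, 4] := by decide

theorem pvRange10 : PySem.List.pyRange 0 10 1 = [0, 1, 2, 3, 4, 5, 6, 7, 8, 9] := by decide

-- the inner `for j in range(5)` block subtracts exactly 10 and the clamp never fires
theorem inner_eq (r : Int) (h : r > 100) :
    (PySem.List.pyRange 0 5 1).foldl (fun result j => pvWhileA (result - j)) r = r - 10 := by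
  rw [pvRange5]
  simp only [List.foldl]
  rw [pvWhileA_eq_self (r - 0) (by omega), pvWhileA_eq_self (r - 0 - 1) (by omega),
    pvWhileA_eq_self (r - 0 - 1 - 2) (by omega), pvWhileA_eq_self (r - 0 - 1 - 2 - 3) (by omega),
    pvWhileA_eq_self (r - 0 - 1 - 2 - 3 - 4) (by omega)]
  omega

theorem step_eq (x y z : Int) (h : (x > y ∧ y < z) ∨ (x = y ∧ y ≠ z) ∨ (x < y ∧ y > z))
    (r i : Int) :
    (if (x > y ∧ y < z) ∨ (x = y ∧ y ≠ z) ∨ (x < y ∧ y > z) then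
      let result := r + i * x * y * z
      if result > 100 then
        (PySem.List.pyRange 0 5 1).foldl (fun result j => pvWhileA (result - j)) result
      else result
    else r) =
    (let result := r + i * (x * y * z)
     if result > 100 then result - 10 else result) := by
  rw [if_pos h]
  have hm : i * x * y * z = i * (x * y * z) := by ring
  simp only [hm]
  split_ifs with h2
  · exact inner_eq _ h2
  · rfl

-- ===== VERDICT (by name: the statement is the Claim_ definition above) =====
theorem complicated_function_spec : Claim_equal_complicated_function := by
  intro x y z _
  unfold Spec_complicated_function complicated_function complicated_function_alt
  by_cases h : (x > y ∧ y < z) ∨ (x = y ∧ y ≠ z) ∨ (x < y ∧ y > z)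
  · rw [if_neg (not_not_intro h)]
    simp only [step_eq x y z h]
  · rw [if_pos h]
    simp only [if_neg h]
    rw [pvRange10]
    simp [List.foldl]
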